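-- pv_equiv track=rewrite | github.com/RohanModi-CA/BlockSSH | track/debug_overlay_track1.py | build_focus_indices
-- ===== SOURCE A (Python) =====
-- def build_focus_indices(n_frames, bad_indices, context):
--     focus = set()
--     for idx in bad_indices:
--         lo = max(0, idx - context)
--         hi = min(n_frames - 1, idx + context)
--         for k in range(lo, hi + 1):
--             focus.add(k)
--     return sorted(focus)
-- ===== SOURCE B (Python) =====
-- def build_focus_indices(n_frames, bad_indices, context):
--     # Sort the clipped windows by left edge, merge adjacent/overlapping ones,
--     # then emit each merged interval as a run of consecutive indices.
--     ivals = sorted(((max(0, i - context), min(n_frames - 1, i + context))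
--                     for i in bad_indices), key=lambda t: t[0])
--     merged = []
--     cur = None
--     for lo, hi in ivals:
--         if lo > hi:
--             continue
--         if cur is None:
--             cur = (lo, hi)
--         elif lo <= cur[1] + 1:
--             cur = (cur[0], max(cur[1], hi))
--         else:
--             merged.append(cur)
--             cur = (lo, hi)
--     if cur is not None:
--         merged.append(cur)
--     out = []
--     for lo, hi in merged:
--         out.extend(range(lo, hi + 1))
--     return out
-- ===== Notes on version B (the rewrite author's own statement) =====
-- stated objective: faster
-- what changed: Instead of adding every index of every window to a set and sorting the set, B sorts the clipped windows by left edge once, merges overlapping/adjacent intervals in one pass, and emits each merged interval as a consecutive run, so no per-index set operations and no sort of the output.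
import Mathlib
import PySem

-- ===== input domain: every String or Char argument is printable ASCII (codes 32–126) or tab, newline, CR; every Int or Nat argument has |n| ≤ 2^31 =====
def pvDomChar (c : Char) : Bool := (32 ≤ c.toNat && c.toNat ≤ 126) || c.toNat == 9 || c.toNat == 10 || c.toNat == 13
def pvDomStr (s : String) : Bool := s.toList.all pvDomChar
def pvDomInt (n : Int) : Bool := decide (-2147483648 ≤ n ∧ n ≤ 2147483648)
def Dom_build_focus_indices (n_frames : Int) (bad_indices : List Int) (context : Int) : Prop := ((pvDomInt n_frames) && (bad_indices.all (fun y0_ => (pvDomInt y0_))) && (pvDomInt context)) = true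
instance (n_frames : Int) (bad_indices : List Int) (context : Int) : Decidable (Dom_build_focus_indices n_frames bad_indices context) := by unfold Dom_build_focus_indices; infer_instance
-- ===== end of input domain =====

-- B replaces A's per-index set insertion + final sort by sort-and-merge of the clipped
-- intervals followed by emitting consecutive runs (objective: faster).

-- ===== PORT A =====
def build_focus_indices (n_frames : Int) (bad_indices : List Int) (context : Int) : List Int :=
  let focus : PySem.Set Int := bad_indices.foldl (fun focus idx =>
    (PySem.List.pyRange (max 0 (idx - context)) (min (n_frames - 1) (idx + context) + 1) 1).foldl
      (fun focus k => PySem.Set.add focus k) focus)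
    PySem.Set.empty
  PySem.List.sorted focus (fun x => x) false

-- ===== PORT B =====
-- one iteration of B's merge loop (state: merged-so-far, current open interval)
def pvMergeStep (st : List (Int × Int) × Option (Int × Int)) (p : Int × Int) :
    List (Int × Int) × Option (Int × Int) :=
  if p.1 > p.2 then st
  else match st.2 with
    | none => (st.1, some p)
    | some c =>
        if p.1 ≤ c.2 + 1 then (st.1, some (c.1, max c.2 p.2))
        else (st.1 ++ [c], some p)

def build_focus_indices_alt (n_frames : Int) (bad_indices : List Int) (context : Int) : List Int :=
  let ivals := PySem.List.sorted
    (bad_indices.map (fun i => (max 0 (i - context), min (n_frames - 1) (i + context))))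
    (fun t => t.1) false
  let st := ivals.foldl pvMergeStep ([], none)
  let merged := match st.2 with | none => st.1 | some c => st.1 ++ [c]
  merged.foldl (fun out p => out ++ PySem.List.pyRange p.1 (p.2 + 1) 1) []

-- ===== PRECONDITION & SPEC =====
def Spec_build_focus_indices (n_frames : Int) (bad_indices : List Int) (context : Int) (out : List Int) : Prop := out = build_focus_indices_alt n_frames bad_indices context
instance (n_frames : Int) (bad_indices : List Int) (context : Int) (out : List Int) : Decidable (Spec_build_focus_indices n_frames bad_indices context out) := by unfold Spec_build_focus_indices; infer_instance

-- ===== CLAIM (what is proved, stated in full; the proofs are below) =====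
def Claim_equal_build_focus_indices : Prop := ∀ (n_frames : Int) (bad_indices : List Int) (context : Int), Dom_build_focus_indices n_frames bad_indices context → Spec_build_focus_indices n_frames bad_indices context (build_focus_indices n_frames bad_indices context)

-- ===== LEMMAS AND PROOFS =====

-- `pvCovered xs k`: k lies in one of the closed intervals of xs
def pvCovered (xs : List (Int × Int)) (k : Int) : Prop := ∃ p ∈ xs, p.1 ≤ k ∧ k ≤ p.2

def pvMerged (st : List (Int × Int) × Option (Int × Int)) : List (Int × Int) :=
  match st.2 with | none => st.1 | some c => st.1 ++ [c]

theorem pvCovered_nil (k : Int) : pvCovered [] k ↔ False := by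
  unfold pvCovered; simp

theorem pvCovered_cons (p : Int × Int) (xs : List (Int × Int)) (k : Int) :
    pvCovered (p :: xs) k ↔ (p.1 ≤ k ∧ k ≤ p.2) ∨ pvCovered xs k := by
  unfold pvCovered
  constructor
  · rintro ⟨q, hq, h⟩
    rcases List.mem_cons.1 hq with rfl | hq'
    · exact Or.inl h
    · exact Or.inr ⟨q, hq', h⟩
  · rintro (h | ⟨q, hq, h⟩)
    · exact ⟨p, List.mem_cons_self, h⟩
    · exact ⟨q, List.mem_cons_of_mem _ hq, h⟩

theorem pvCovered_append (xs ys : List (Int × Int)) (k : Int) :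
    pvCovered (xs ++ ys) k ↔ pvCovered xs k ∨ pvCovered ys k := by
  unfold pvCovered
  constructor
  · rintro ⟨q, hq, h⟩
    rcases List.mem_append.1 hq with h' | h'
    · exact Or.inl ⟨q, h', h⟩
    · exact Or.inr ⟨q, h', h⟩
  · rintro (⟨q, hq, h⟩ | ⟨q, hq, h⟩)
    · exact ⟨q, List.mem_append_left _ hq, h⟩
    · exact ⟨q, List.mem_append_right _ hq, h⟩

-- folding Set.add over a list: membership and nodup
theorem pv_mem_foldl_add (l : List Int) (s : PySem.Set Int) (k : Int) :
    (k ∈ l.foldl (fun s x => PySem.Set.add s x) s) ↔ k ∈ s ∨ k ∈ l := by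
  induction l generalizing s with
  | nil => simp
  | cons x t ih => simp [List.foldl, ih, PySem.Set.mem_add]; tauto

theorem pv_nodup_foldl_add (l : List Int) (s : PySem.Set Int) (h : s.Nodup) :
    (l.foldl (fun s x => PySem.Set.add s x) s).Nodup := by
  induction l generalizing s with
  | nil => exact h
  | cons x t ih => exact ih _ (PySem.Set.nodup_add _ _ h)

-- membership of A's set, generalized over the initial set
theorem pv_mem_focus_aux (n_frames : Int) (bad : List Int) (context : Int)
    (s : PySem.Set Int) (k : Int) :
    (k ∈ bad.foldl (fun focus idx =>
      (PySem.List.pyRange (max 0 (idx - context)) (min (n_frames - 1) (idx + context) + 1) 1).foldl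
        (fun focus k => PySem.Set.add focus k) focus) s) ↔
    k ∈ s ∨ ∃ i ∈ bad, max 0 (i - context) ≤ k ∧ k ≤ min (n_frames - 1) (i + context) := by
  induction bad generalizing s with
  | nil => simp
  | cons x t ih =>
    rw [List.foldl_cons, ih, pv_mem_foldl_add]
    simp only [PySem.List.mem_pyRange_one, List.mem_cons]
    constructor
    · rintro ((h | ⟨h1, h2⟩) | ⟨i, hi, h1, h2⟩)
      · exact Or.inl h
      · exact Or.inr ⟨x, Or.inl rfl, h1, by omega⟩
      · exact Or.inr ⟨i, Or.inr hi, h1, h2⟩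
    · rintro (h | ⟨i, (rfl | hi), h1, h2⟩)
      · exact Or.inl (Or.inl h)
      · exact Or.inl (Or.inr ⟨h1, by omega⟩)
      · exact Or.inr ⟨i, hi, h1, h2⟩

theorem pv_nodup_focus_aux (n_frames : Int) (bad : List Int) (context : Int)
    (s : PySem.Set Int) (h : s.Nodup) :
    (bad.foldl (fun focus idx =>
      (PySem.List.pyRange (max 0 (idx - context)) (min (n_frames - 1) (idx + context) + 1) 1).foldl
        (fun focus k => PySem.Set.add focus k) focus) s).Nodup := by
  induction bad generalizing s with
  | nil => exact h
  | cons x t ih => exact ih _ (pv_nodup_foldl_add _ _ h)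

-- merge-fold invariant
theorem pv_merge_fold (l : List (Int × Int)) :
    ∀ (st : List (Int × Int) × Option (Int × Int)),
    (pvMerged st).Pairwise (fun p q => p.2 + 1 < q.1) →
    (∀ p ∈ pvMerged st, p.1 ≤ p.2) →
    (st.2 = none → st.1 = []) →
    l.Pairwise (fun a b => a.1 ≤ b.1) →
    (∀ p ∈ l, ∀ c, st.2 = some c → c.1 ≤ p.1) →
    (pvMerged (l.foldl pvMergeStep st)).Pairwise (fun p q => p.2 + 1 < q.1) ∧
    (∀ p ∈ pvMerged (l.foldl pvMergeStep st), p.1 ≤ p.2) ∧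
    (∀ k, pvCovered (pvMerged (l.foldl pvMergeStep st)) k ↔
          pvCovered (pvMerged st) k ∨ pvCovered l k) := by
  induction l with
  | nil =>
    intro st hpw hval hnone _ _
    refine ⟨hpw, hval, fun k => ?_⟩
    rw [pvCovered_nil]; tauto
  | cons p t ih =>
    intro st hpw hval hnone hsorted hbound
    rw [List.pairwise_cons] at hsorted
    obtain ⟨hhead, htail⟩ := hsorted
    rw [List.foldl_cons]
    by_cases hp : p.1 > p.2
    · -- empty window: state unchanged
      have hstep : pvMergeStep st p = st := by simp [pvMergeStep, hp]
      rw [hstep]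
      obtain ⟨a, b, c⟩ := ih st hpw hval hnone htail
        (fun q hq c hc => hbound q (List.mem_cons_of_mem _ hq) c hc)
      refine ⟨a, b, fun k => ?_⟩
      rw [c k, pvCovered_cons]
      constructor
      · rintro (h | h)
        · exact Or.inl h
        · exact Or.inr (Or.inr h)
      · rintro (h | ⟨h1, h2⟩ | h)
        · exact Or.inl h
        · omega
        · exact Or.inr h
    · rw [not_lt] at hp
      cases hcur : st.2 with
      | none =>
        have h1 : st.1 = [] := hnone hcur
        have hstep : pvMergeStep st p = ([], some p) := by
          simp [pvMergeStep, hcur, h1, if_neg (by omega : ¬ p.1 > p.2)]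
        rw [hstep]
        obtain ⟨a, b, c⟩ := ih ([], some p)
          (by simp [pvMerged])
          (by simp [pvMerged]; omega)
          (by simp)
          htail
          (by rintro q hq c hc
              injection hc with hc; subst hc
              exact hhead q hq)
        refine ⟨a, b, fun k => ?_⟩
        rw [c k]
        have hmold : pvMerged st = [] := by simp [pvMerged, hcur, h1]
        have hmnew : pvMerged ([], some p) = [p] := rfl
        rw [hmold, hmnew, pvCovered_cons p [], pvCovered_cons p t, pvCovered_nil]
        tauto
      | some cc =>
        have hc12 : cc.1 ≤ cc.2 := hval cc (by simp [pvMerged, hcur])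
        have hcp : cc.1 ≤ p.1 := hbound p List.mem_cons_self cc hcur
        have hmold : pvMerged st = st.1 ++ [cc] := by simp [pvMerged, hcur]
        have hpwA : (st.1 ++ [cc]).Pairwise (fun p q => p.2 + 1 < q.1) := hmold ▸ hpw
        obtain ⟨hpw1, -, hcross⟩ := List.pairwise_append.1 hpwA
        by_cases hov : p.1 ≤ cc.2 + 1
        · -- overlap/adjacent: extend current interval
          have hstep : pvMergeStep st p = (st.1, some (cc.1, max cc.2 p.2)) := by
            simp [pvMergeStep, hcur, if_neg (by omega : ¬ p.1 > p.2), if_pos hov]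
          rw [hstep]
          have hmnew : pvMerged (st.1, some (cc.1, max cc.2 p.2)) = st.1 ++ [(cc.1, max cc.2 p.2)] := rfl
          obtain ⟨a, b, c⟩ := ih (st.1, some (cc.1, max cc.2 p.2))
            (by rw [hmnew, List.pairwise_append]
                refine ⟨hpw1, by simp, ?_⟩
                intro q hq r hr
                simp only [List.mem_singleton] at hr; subst hr
                exact hcross q hq cc (by simp))
            (by rw [hmnew]
                intro q hq
                rcases List.mem_append.1 hq with h | h
                · exact hval q (by rw [hmold]; exact List.mem_append_left _ h)
                · simp only [List.mem_singleton] at h; subst h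
                  simp only []
                  omega)
            (by simp)
            htail
            (by rintro q hq c hc
                injection hc with hc; subst hc
                exact hcp.trans (hhead q hq))
          refine ⟨a, b, fun k => ?_⟩
          rw [c k, hmnew, hmold, pvCovered_append, pvCovered_append,
            pvCovered_cons _ [], pvCovered_cons _ [], pvCovered_cons p t,
            pvCovered_nil]
          have hwin : (cc.1 ≤ k ∧ k ≤ max cc.2 p.2) ↔
              ((cc.1 ≤ k ∧ k ≤ cc.2) ∨ (p.1 ≤ k ∧ k ≤ p.2)) := by omega
          constructor
          · rintro ((h | h | h) | h)
            · exact Or.inl (Or.inl h)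
            · rcases hwin.1 h with h' | h'
              · exact Or.inl (Or.inr (Or.inl h'))
              · exact Or.inr (Or.inl h')
            · exact h.elim
            · exact Or.inr (Or.inr h)
          · rintro ((h | h | h) | h | h)
            · exact Or.inl (Or.inl h)
            · exact Or.inl (Or.inr (Or.inl (hwin.2 (Or.inl h))))
            · exact h.elim
            · exact Or.inl (Or.inr (Or.inl (hwin.2 (Or.inr h))))
            · exact Or.inr h
        · -- gap: close current interval, open a new one
          have hstep : pvMergeStep st p = (st.1 ++ [cc], some p) := by
            simp [pvMergeStep, hcur, if_neg (by omega : ¬ p.1 > p.2), if_neg hov]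
          rw [hstep]
          have hmnew : pvMerged (st.1 ++ [cc], some p) = (st.1 ++ [cc]) ++ [p] := rfl
          obtain ⟨a, b, c⟩ := ih (st.1 ++ [cc], some p)
            (by rw [hmnew, List.pairwise_append]
                refine ⟨hpwA, by simp, ?_⟩
                intro q hq r hr
                simp only [List.mem_singleton] at hr; subst hr
                rcases List.mem_append.1 hq with h | h
                · have := hcross q h cc (by simp); omega
                · simp only [List.mem_singleton] at h; subst h; omega)
            (by rw [hmnew]
                intro q hq
                rcases List.mem_append.1 hq with h | h
                · exact hval q (by rw [hmold]; exact h)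
                · simp only [List.mem_singleton] at h; subst h; omega)
            (by simp)
            htail
            (by rintro q hq c hc
                injection hc with hc; subst hc
                exact hhead q hq)
          refine ⟨a, b, fun k => ?_⟩
          rw [c k, hmnew, hmold]
          simp only [pvCovered_append, pvCovered_cons, pvCovered_nil]
          tauto

-- folding ++ starts from the accumulator
theorem pv_flatten_shift (t : List (Int × Int)) (init : List Int) :
    t.foldl (fun out p => out ++ PySem.List.pyRange p.1 (p.2 + 1) 1) init =
    init ++ t.foldl (fun out p => out ++ PySem.List.pyRange p.1 (p.2 + 1) 1) [] := by
  induction t generalizing init with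
  | nil => simp
  | cons q u ihq =>
    rw [List.foldl_cons, ihq, List.foldl_cons, List.nil_append,
      ihq (PySem.List.pyRange q.1 (q.2 + 1) 1), List.append_assoc]

-- flatten of intervals: membership
theorem pv_flatten_mem (xs : List (Int × Int)) (k : Int) :
    (k ∈ xs.foldl (fun out p => out ++ PySem.List.pyRange p.1 (p.2 + 1) 1) []) ↔ pvCovered xs k := by
  induction xs with
  | nil => rw [pvCovered_nil]; simp
  | cons p t ih =>
    rw [List.foldl_cons, List.nil_append, pv_flatten_shift, List.mem_append, ih,
      PySem.List.mem_pyRange_one, pvCovered_cons]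
    constructor
    · rintro (⟨h1, h2⟩ | h)
      · exact Or.inl ⟨h1, by omega⟩
      · exact Or.inr h
    · rintro (⟨h1, h2⟩ | h)
      · exact Or.inl ⟨h1, by omega⟩
      · exact Or.inr h

-- flatten of gap-separated intervals is strictly increasing
theorem pv_flatten_pairwise (xs : List (Int × Int))
    (hpw : xs.Pairwise (fun p q => p.2 + 1 < q.1)) :
    (xs.foldl (fun out p => out ++ PySem.List.pyRange p.1 (p.2 + 1) 1) []).Pairwise (· < ·) := by
  induction xs with
  | nil => simp
  | cons p t ih =>
    rw [List.pairwise_cons] at hpw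
    obtain ⟨hhead, htail⟩ := hpw
    rw [List.foldl_cons, List.nil_append, pv_flatten_shift, List.pairwise_append]
    refine ⟨PySem.List.pairwise_lt_pyRange_one _ _, ih htail, ?_⟩
    intro a ha b hb
    rw [PySem.List.mem_pyRange_one] at ha
    rw [pv_flatten_mem] at hb
    obtain ⟨q, hq, hb1, -⟩ := hb
    have := hhead q hq
    omega

-- ===== VERDICT (by name: the statement is the Claim_ definition above) =====
theorem build_focus_indices_spec : Claim_equal_build_focus_indices := by
  intro n_frames bad context _
  unfold Spec_build_focus_indices
  show PySem.List.sorted _ (fun x => x) false = _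
  set f : Int → Int × Int := fun i => (max 0 (i - context), min (n_frames - 1) (i + context)) with hf
  set ivals := PySem.List.sorted (bad.map f) (fun t => t.1) false with hiv
  have hsort : ivals.Pairwise (fun a b => a.1 ≤ b.1) := PySem.List.sorted_pairwise _ _
  obtain ⟨hpw, -, hcov⟩ := pv_merge_fold ivals ([], none)
    (by simp [pvMerged]) (by simp [pvMerged]) (by simp) hsort (by simp)
  set st := ivals.foldl pvMergeStep ([], none) with hst
  set merged := pvMerged st with hm
  set res := merged.foldl (fun out p => out ++ PySem.List.pyRange p.1 (p.2 + 1) 1) [] with hres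
  have hB : build_focus_indices_alt n_frames bad context = res := rfl
  rw [hB]
  have hrespw : res.Pairwise (· < ·) := pv_flatten_pairwise merged hpw
  have hmemres : ∀ k, k ∈ res ↔
      ∃ i ∈ bad, max 0 (i - context) ≤ k ∧ k ≤ min (n_frames - 1) (i + context) := by
    intro k
    rw [hres, pv_flatten_mem, hcov k]
    have h0 : pvCovered (pvMerged ([], none)) k ↔ False := by
      rw [show pvMerged ([], none) = ([] : List (Int × Int)) from rfl, pvCovered_nil]
    rw [h0, false_or]
    unfold pvCovered
    constructor
    · rintro ⟨p, hp, h1, h2⟩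
      rw [hiv, PySem.List.mem_sorted] at hp
      obtain ⟨i, hi, rfl⟩ := List.mem_map.1 hp
      exact ⟨i, hi, h1, h2⟩
    · rintro ⟨i, hi, h1, h2⟩
      refine ⟨f i, ?_, h1, h2⟩
      rw [hiv, PySem.List.mem_sorted]
      exact List.mem_map_of_mem hi
  apply PySem.List.sorted_eq_of_perm_of_pairwise_lt
  · rw [List.perm_ext_iff_of_nodup (hrespw.imp ne_of_lt)
      (pv_nodup_focus_aux n_frames bad context _ (by simp [PySem.Set.empty]))]
    intro a
    rw [hmemres a, pv_mem_focus_aux]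
    simp [PySem.Set.empty]
  · exact hrespw.imp (fun h => h)
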